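-- pv_equiv track=rewrite | github.com/ludmilaaysha/listai4.0 | graficos.py | fourthRule
-- ===== SOURCE A (Python) =====
-- def fourthRule(values, cl):
--     auxSup = 0
--     auxInf = 0
--     for value in values:
--         if value > cl:
--             auxInf = 0
--             auxSup += 1
--             if auxSup >= 9:
--                 return False
--         else:
--             auxSup = 0
--             if value < cl:
--                 auxInf += 1
--                 if auxInf >= 9:
--                     return False
--     return True
-- ===== SOURCE B (Python) =====
-- def fourthRule(values, cl):
--     # Two independent passes: one for runs strictly above cl, one for runs
--     # strictly below cl (a value equal to cl leaves the below-run intact).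
--     run = 0
--     for v in values:
--         run = run + 1 if v > cl else 0
--         if run >= 9:
--             return False
--     run = 0
--     for v in values:
--         if v < cl:
--             run += 1
--             if run >= 9:
--                 return False
--         elif v > cl:
--             run = 0
--     return True
-- ===== Notes on version B (the rewrite author's own statement) =====
-- stated objective: alternative
-- what changed: The single combined scan maintaining two coupled counters is split into two independent passes, one detecting a run of 9 points strictly above cl, the other a run of 9 strictly below cl (equal-to-cl points leave the below-run intact).
import Mathlib
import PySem

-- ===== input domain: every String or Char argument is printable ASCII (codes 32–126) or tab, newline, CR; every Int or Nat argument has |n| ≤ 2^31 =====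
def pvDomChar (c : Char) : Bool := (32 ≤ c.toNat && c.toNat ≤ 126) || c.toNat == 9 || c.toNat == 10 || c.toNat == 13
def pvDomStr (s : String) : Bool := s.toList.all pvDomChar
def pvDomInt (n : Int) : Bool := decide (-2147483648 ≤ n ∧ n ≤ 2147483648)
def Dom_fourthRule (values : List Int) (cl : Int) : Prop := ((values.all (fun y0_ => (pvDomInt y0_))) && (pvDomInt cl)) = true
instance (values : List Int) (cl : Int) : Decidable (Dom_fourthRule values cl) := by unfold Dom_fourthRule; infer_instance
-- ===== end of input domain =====

-- B replaces A's single scan with two coupled counters by two independent one-counter passes (objective: alternative decomposition).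

-- ===== PORT A =====
-- combined loop over (auxSup, auxInf), early return False on a run of 9
def fourthRuleGo (cl : Int) : List Int → Int → Int → Bool
  | [], _, _ => true
  | v :: vs, auxSup, auxInf =>
    if v > cl then
      -- auxInf = 0; auxSup += 1; if auxSup >= 9: return False
      if auxSup + 1 ≥ 9 then false else fourthRuleGo cl vs (auxSup + 1) 0
    else
      -- auxSup = 0
      if v < cl then
        if auxInf + 1 ≥ 9 then false else fourthRuleGo cl vs 0 (auxInf + 1)
      else fourthRuleGo cl vs 0 auxInf

def fourthRule (values : List Int) (cl : Int) : Bool :=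
  fourthRuleGo cl values 0 0

-- ===== PORT B =====
-- first pass: run of values strictly above cl
def frAbove (cl : Int) : List Int → Int → Bool
  | [], _ => true
  | v :: vs, run =>
    let run' := if v > cl then run + 1 else 0
    if run' ≥ 9 then false else frAbove cl vs run'

-- second pass: run of values strictly below cl; v = cl leaves the counter intact
def frBelow (cl : Int) : List Int → Int → Bool
  | [], _ => true
  | v :: vs, run =>
    if v < cl then
      if run + 1 ≥ 9 then false else frBelow cl vs (run + 1)
    else if v > cl then frBelow cl vs 0
    else frBelow cl vs run

def fourthRule_alt (values : List Int) (cl : Int) : Bool :=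
  frAbove cl values 0 && frBelow cl values 0

-- ===== PRECONDITION & SPEC =====
def Spec_fourthRule (values : List Int) (cl : Int) (out : Bool) : Prop := out = fourthRule_alt values cl
instance (values : List Int) (cl : Int) (out : Bool) : Decidable (Spec_fourthRule values cl out) := by unfold Spec_fourthRule; infer_instance

-- ===== CLAIM (what is proved, stated in full; the proofs are below) =====
def Claim_equal_fourthRule : Prop := ∀ (values : List Int) (cl : Int), Dom_fourthRule values cl → Spec_fourthRule values cl (fourthRule values cl)

-- ===== LEMMAS AND PROOFS =====
theorem fourthRuleGo_eq (cl : Int) (vs : List Int) :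
    ∀ s i : Int, fourthRuleGo cl vs s i = (frAbove cl vs s && frBelow cl vs i) := by
  induction vs with
  | nil => intro s i; simp [fourthRuleGo, frAbove, frBelow]
  | cons v vs ih =>
    intro s i
    by_cases hgt : v > cl
    · have hlt : ¬ v < cl := by omega
      by_cases h9 : s + 1 ≥ 9 <;>
        simp [fourthRuleGo, frAbove, frBelow, hgt, hlt, h9, ih]
    · by_cases hlt : v < cl
      · by_cases h9 : i + 1 ≥ 9 <;>
          simp [fourthRuleGo, frAbove, frBelow, hgt, hlt, h9, ih]
      · simp [fourthRuleGo, frAbove, frBelow, hgt, hlt, ih]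

-- ===== VERDICT (by name: the statement is the Claim_ definition above) =====
theorem fourthRule_spec : Claim_equal_fourthRule := by
  intro values cl _
  unfold Spec_fourthRule fourthRule fourthRule_alt
  exact fourthRuleGo_eq cl values 0 0
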